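-- pv_equiv track=rewrite | github.com/hmkim199/PrepareCodingTest | Programmers/133499.py | solution
-- ===== SOURCE A (Python) =====
-- def solution(babbling):
--     answer = 0
--     baby_word = {"aya", "ye", "woo", "ma"}
--     for word in babbling:
--         start = 0
--         before = ""
--         for i in range(1, len(word)+1):
--             if word[start:i] != before and word[start:i] in baby_word:
--                 before = word[start:i]
--                 start = i
--         if start == len(word):
--             answer += 1
--     return answer
-- ===== SOURCE B (Python) =====
-- def tokenize(word):
--     for t in ("aya", "ye", "woo", "ma"):
--         if word.startswith(t):
--             tokens, rest = tokenize(word[len(t):])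
--             return [t] + tokens, rest
--     return [], word
--
--
-- def no_adjacent_repeat(tokens):
--     if len(tokens) < 2:
--         return True
--     return tokens[0] != tokens[1] and no_adjacent_repeat(tokens[1:])
--
--
-- def solution(babbling):
--     answer = 0
--     for word in babbling:
--         tokens, rest = tokenize(word)
--         if rest == "" and no_adjacent_repeat(tokens):
--             answer += 1
--     return answer
-- ===== Notes on version B (the rewrite author's own statement) =====
-- stated objective: alternative
-- what changed: A's single fused greedy scan over all slice endpoints with cursor+'before' state is replaced by a two-pass decomposition: first tokenize the word into a list of matched baby words (left-to-right prefix matching), then validate separately that the tokens cover the whole word and no two adjacent tokens are equal.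
import Mathlib
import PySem

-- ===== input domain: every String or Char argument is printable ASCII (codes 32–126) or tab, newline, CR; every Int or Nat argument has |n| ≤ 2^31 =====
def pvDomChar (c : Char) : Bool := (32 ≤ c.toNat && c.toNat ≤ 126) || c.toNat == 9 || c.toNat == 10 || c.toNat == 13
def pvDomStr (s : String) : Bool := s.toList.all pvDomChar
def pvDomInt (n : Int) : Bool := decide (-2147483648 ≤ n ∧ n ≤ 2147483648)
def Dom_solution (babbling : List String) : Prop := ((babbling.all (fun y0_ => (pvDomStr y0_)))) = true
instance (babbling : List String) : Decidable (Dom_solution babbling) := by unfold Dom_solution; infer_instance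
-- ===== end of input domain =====

-- B replaces A's fused greedy scan (cursor + 'before' state over all slice endpoints) by a
-- two-pass decomposition: tokenize the word into matched baby words, then validate
-- (no leftover rest, no adjacent repeated token).  Objective: alternative decomposition.

-- ===== PORT A =====
def babyWord : PySem.Set (List Char) :=
  PySem.Set.ofList [['a','y','a'], ['y','e'], ['w','o','o'], ['m','a']]

def stepA (w : List Char) (st : Int × List Char) (i : Int) : Int × List Char :=
  if PySem.List.slice w (some st.1) (some i) ≠ st.2 ∧
     PySem.List.slice w (some st.1) (some i) ∈ babyWord then
    (i, PySem.List.slice w (some st.1) (some i))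
  else st

def solution (babbling : List String) : Int :=
  babbling.foldl (fun answer word =>
    let w := word.toList
    let st := (PySem.List.pyRange 1 ((w.length : Int) + 1) 1).foldl (stepA w) (0, [])
    if st.1 = (w.length : Int) then answer + 1 else answer) 0

-- ===== PORT B =====
def tokenizeB (r : List Char) : List (List Char) × List Char :=
  if _h1 : PySem.Chars.startswith r ['a','y','a'] then
    let p := tokenizeB (r.drop 3); (['a','y','a'] :: p.1, p.2)
  else if _h2 : PySem.Chars.startswith r ['y','e'] then
    let p := tokenizeB (r.drop 2); (['y','e'] :: p.1, p.2)
  else if _h3 : PySem.Chars.startswith r ['w','o','o'] then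
    let p := tokenizeB (r.drop 3); (['w','o','o'] :: p.1, p.2)
  else if _h4 : PySem.Chars.startswith r ['m','a'] then
    let p := tokenizeB (r.drop 2); (['m','a'] :: p.1, p.2)
  else ([], r)
termination_by r.length
decreasing_by
  · have := (PySem.Chars.startswith_iff (s := r) (p := ['a','y','a'])).1 _h1
    have := this.length_le; simp at this ⊢; omega
  · have := (PySem.Chars.startswith_iff (s := r) (p := ['y','e'])).1 _h2
    have := this.length_le; simp at this ⊢; omega
  · have := (PySem.Chars.startswith_iff (s := r) (p := ['w','o','o'])).1 _h3
    have := this.length_le; simp at this ⊢; omega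
  · have := (PySem.Chars.startswith_iff (s := r) (p := ['m','a'])).1 _h4
    have := this.length_le; simp at this ⊢; omega

def noAdj : List (List Char) → Bool
  | [] => true
  | [_] => true
  | a :: b :: rest => a != b && noAdj (b :: rest)

def solution_alt (babbling : List String) : Int :=
  babbling.foldl (fun answer word =>
    let p := tokenizeB word.toList
    if p.2 = [] ∧ noAdj p.1 then answer + 1 else answer) 0

-- ===== PRECONDITION & SPEC =====
def Spec_solution (babbling : List String) (out : Int) : Prop := out = solution_alt babbling
instance (babbling : List String) (out : Int) : Decidable (Spec_solution babbling out) := by unfold Spec_solution; infer_instance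

-- ===== CLAIM (what is proved, stated in full; the proofs are below) =====
def Claim_equal_solution : Prop := ∀ (babbling : List String), Dom_solution babbling → Spec_solution babbling (solution babbling)

-- ===== LEMMAS AND PROOFS =====

def matchLen (r : List Char) : Nat :=
  if ['a','y','a'] <+: r then 3 else if ['y','e'] <+: r then 2
  else if ['w','o','o'] <+: r then 3 else if ['m','a'] <+: r then 2 else 0

def chainOk : List Char → List (List Char) → Bool
  | _, [] => true
  | b, t :: ts => (t != b) && chainOk t ts

lemma babyWord_eq : babyWord = [['a','y','a'], ['y','e'], ['w','o','o'], ['m','a']] := by decide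

lemma heads_clash {x y : Char} {xs ys r : List Char} (hxy : x ≠ y)
    (h1 : (x :: xs) <+: r) (h2 : (y :: ys) <+: r) : False := by
  obtain ⟨t1, rfl⟩ := h1
  obtain ⟨t2, h2⟩ := h2
  simp only [List.cons_append, List.cons.injEq] at h2
  exact hxy h2.1.symm

lemma matchLen_le (r : List Char) : matchLen r ≤ r.length := by
  unfold matchLen
  split_ifs with hA hY hW hM
  · simpa using hA.length_le
  · simpa using hY.length_le
  · simpa using hW.length_le
  · simpa using hM.length_le
  · omega

lemma take_eq_iff {r T : List Char} {k : Nat} (h2 : k ≤ r.length) :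
    r.take k = T ↔ (k = T.length ∧ T <+: r) := by
  constructor
  · rintro rfl
    exact ⟨by simp [Nat.min_eq_left h2], List.take_prefix k r⟩
  · rintro ⟨rfl, hp⟩
    exact (List.prefix_iff_eq_take.1 hp).symm

lemma mem_take_iff (r : List Char) (k : Nat) (h1 : 1 ≤ k) (h2 : k ≤ r.length) :
    (r.take k ∈ babyWord) ↔ (matchLen r ≠ 0 ∧ k = matchLen r) := by
  rw [babyWord_eq]
  simp only [List.mem_cons, List.not_mem_nil, or_false, take_eq_iff h2]
  unfold matchLen
  split_ifs with hA hY hW hM <;> constructor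
  · rintro (⟨hk, hp⟩ | ⟨hk, hp⟩ | ⟨hk, hp⟩ | ⟨hk, hp⟩)
    · exact ⟨by decide, by simpa using hk⟩
    · exact (heads_clash (by decide) hp hA).elim
    · exact (heads_clash (by decide) hp hA).elim
    · exact (heads_clash (by decide) hp hA).elim
  · rintro ⟨-, rfl⟩; exact Or.inl ⟨by simp, hA⟩
  · rintro (⟨hk, hp⟩ | ⟨hk, hp⟩ | ⟨hk, hp⟩ | ⟨hk, hp⟩)
    · exact (hA hp).elim
    · exact ⟨by decide, by simpa using hk⟩
    · exact (heads_clash (by decide) hp hY).elim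
    · exact (heads_clash (by decide) hp hY).elim
  · rintro ⟨-, rfl⟩; exact Or.inr (Or.inl ⟨by simp, hY⟩)
  · rintro (⟨hk, hp⟩ | ⟨hk, hp⟩ | ⟨hk, hp⟩ | ⟨hk, hp⟩)
    · exact (hA hp).elim
    · exact (hY hp).elim
    · exact ⟨by decide, by simpa using hk⟩
    · exact (heads_clash (by decide) hp hW).elim
  · rintro ⟨-, rfl⟩; exact Or.inr (Or.inr (Or.inl ⟨by simp, hW⟩))
  · rintro (⟨hk, hp⟩ | ⟨hk, hp⟩ | ⟨hk, hp⟩ | ⟨hk, hp⟩)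
    · exact (hA hp).elim
    · exact (hY hp).elim
    · exact (hW hp).elim
    · exact ⟨by decide, by simpa using hk⟩
  · rintro ⟨-, rfl⟩; exact Or.inr (Or.inr (Or.inr ⟨by simp, hM⟩))
  · rintro (⟨hk, hp⟩ | ⟨hk, hp⟩ | ⟨hk, hp⟩ | ⟨hk, hp⟩)
    · exact (hA hp).elim
    · exact (hY hp).elim
    · exact (hW hp).elim
    · exact (hM hp).elim
  · rintro ⟨h, -⟩; exact (h rfl).elim

lemma foldl_fixed {α β : Type} (f : β → α → β) (c : β) (l : List α)
    (h : ∀ i ∈ l, f c i = c) : l.foldl f c = c := by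
  induction l with
  | nil => rfl
  | cons a l ih =>
    rw [List.foldl_cons, h a (List.mem_cons_self ..)]
    exact ih (fun i hi => h i (List.mem_cons_of_mem _ hi))

lemma tokenize_none {r : List Char} (h : matchLen r = 0) : tokenizeB r = ([], r) := by
  unfold matchLen at h
  split_ifs at h with hA hY hW hM
  rw [tokenizeB]
  simp [PySem.Chars.startswith_iff, hA, hY, hW, hM]

lemma tokenize_pos {r : List Char} (h : matchLen r ≠ 0) :
    tokenizeB r = (r.take (matchLen r) :: (tokenizeB (r.drop (matchLen r))).1,
                   (tokenizeB (r.drop (matchLen r))).2) := by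
  unfold matchLen at h ⊢
  split_ifs with hA hY hW hM
  · rw [tokenizeB]
    have ht : r.take 3 = ['a','y','a'] := (List.prefix_iff_eq_take.1 hA).symm
    simp [PySem.Chars.startswith_iff, hA, ht]
  · rw [tokenizeB]
    have ht : r.take 2 = ['y','e'] := (List.prefix_iff_eq_take.1 hY).symm
    simp [PySem.Chars.startswith_iff, hA, hY, ht]
  · rw [tokenizeB]
    have ht : r.take 3 = ['w','o','o'] := (List.prefix_iff_eq_take.1 hW).symm
    simp [PySem.Chars.startswith_iff, hA, hY, hW, ht]
  · rw [tokenizeB]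
    have ht : r.take 2 = ['m','a'] := (List.prefix_iff_eq_take.1 hM).symm
    simp [PySem.Chars.startswith_iff, hA, hY, hW, hM, ht]
  · rw [if_neg hA, if_neg hY, if_neg hW, if_neg hM] at h
    exact (h rfl).elim

lemma chainOk_noAdj (ts : List (List Char)) : ∀ t, chainOk t ts = noAdj (t :: ts) := by
  induction ts with
  | nil => intro t; rfl
  | cons u us ih =>
    intro t
    have hc : (u != t) = (t != u) := by
      rw [Bool.eq_iff_iff, bne_iff_ne, bne_iff_ne]
      exact ne_comm
    rw [chainOk, noAdj, hc, ih u]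

lemma loopA (w : List Char) : ∀ (k s : Nat) (b : List Char), s + k = w.length →
    ((((PySem.List.pyRange ((s:Int)+1) ((w.length:Int)+1) 1).foldl (stepA w) ((s:Int), b)).1
        = (w.length:Int))
      ↔ ((tokenizeB (w.drop s)).2 = [] ∧ chainOk b (tokenizeB (w.drop s)).1 = true)) := by
  intro k
  induction k using Nat.strong_induction_on with
  | _ k ih =>
  intro s b hsk
  have hrlen : (w.drop s).length = k := by simp; omega
  have hstep : ∀ i : Int, (s:Int) < i → i ≤ (w.length:Int) →
      PySem.List.slice w (some (s:Int)) (some i) = (w.drop s).take (i - s).toNat := by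
    intro i h1 h2
    have hi : i = (s:Int) + (((i - s).toNat : Nat) : Int) := by omega
    rw [hi, PySem.List.slice_natCast_add]
    congr 1
    omega
  by_cases hm : matchLen (w.drop s) = 0
  · have hfix : ∀ i ∈ PySem.List.pyRange ((s:Int)+1) ((w.length:Int)+1) 1,
        stepA w ((s:Int), b) i = ((s:Int), b) := by
      intro i hi
      rw [PySem.List.mem_pyRange_one] at hi
      unfold stepA
      rw [hstep i (by omega) (by omega), if_neg]
      rintro ⟨-, hmem⟩
      exact ((mem_take_iff _ _ (by omega) (by omega)).1 hmem).1 hm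
    rw [foldl_fixed _ _ _ hfix, tokenize_none hm]
    simp only [chainOk]
    constructor
    · intro h
      have : s = w.length := by exact_mod_cast h
      exact ⟨by rw [List.drop_eq_nil_iff]; omega, by simp⟩
    · rintro ⟨h, -⟩
      rw [List.drop_eq_nil_iff] at h
      have : s = w.length := by omega
      exact_mod_cast congrArg (Nat.cast : Nat → Int) this
  · set m := matchLen (w.drop s) with hmdef
    have hm1 : 1 ≤ m := Nat.one_le_iff_ne_zero.2 hm
    have hmle : m ≤ k := hrlen ▸ matchLen_le (w.drop s)
    set t := (w.drop s).take m with htdef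
    have htok := tokenize_pos hm
    by_cases htb : t = b
    · have hfix : ∀ i ∈ PySem.List.pyRange ((s:Int)+1) ((w.length:Int)+1) 1,
          stepA w ((s:Int), b) i = ((s:Int), b) := by
        intro i hi
        rw [PySem.List.mem_pyRange_one] at hi
        unfold stepA
        rw [hstep i (by omega) (by omega), if_neg]
        rintro ⟨hne, hmem⟩
        have := ((mem_take_iff _ _ (by omega) (by omega)).1 hmem).2
        apply hne
        rw [this, ← hmdef, ← htdef, htb]
      rw [foldl_fixed _ _ _ hfix, htok]
      simp only [chainOk]
      constructor
      · intro h
        have hs : s = w.length := by exact_mod_cast h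
        exfalso; omega
      · rintro ⟨-, hchain⟩
        rw [← hmdef, ← htdef, htb] at hchain
        simp at hchain
    · have e1 : PySem.List.pyRange ((s:Int)+1) ((w.length:Int)+1) 1
          = PySem.List.pyRange ((s:Int)+1) ((s:Int)+(m:Int)+1) 1
            ++ PySem.List.pyRange ((s:Int)+(m:Int)+1) ((w.length:Int)+1) 1 :=
        PySem.List.pyRange_one_append _ _ _ (by omega) (by omega)
      have e2 : PySem.List.pyRange ((s:Int)+1) ((s:Int)+(m:Int)+1) 1
          = PySem.List.pyRange ((s:Int)+1) ((s:Int)+(m:Int)) 1 ++ [(s:Int)+(m:Int)] :=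
        PySem.List.pyRange_one_succ_right (by omega)
      have hfix1 : ∀ i ∈ PySem.List.pyRange ((s:Int)+1) ((s:Int)+(m:Int)) 1,
          stepA w ((s:Int), b) i = ((s:Int), b) := by
        intro i hi
        rw [PySem.List.mem_pyRange_one] at hi
        unfold stepA
        rw [hstep i (by omega) (by omega), if_neg]
        rintro ⟨-, hmem⟩
        have := ((mem_take_iff _ _ (by omega) (by omega)).1 hmem).2
        omega
      have hmem : t ∈ babyWord := by
        rw [htdef]
        exact (mem_take_iff _ _ (by omega) (by omega)).2 ⟨hm, hmdef⟩
      have hone : stepA w ((s:Int), b) ((s:Int)+(m:Int)) = (((s+m : Nat) : Int), t) := by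
        unfold stepA
        rw [hstep _ (by omega) (by omega)]
        have hj : (((s:Int)+(m:Int)) - (s:Int)).toNat = m := by omega
        rw [hj, ← htdef]
        rw [if_pos ⟨htb, hmem⟩]
        have hcc : ((s:Int) + (m:Int)) = (((s+m:Nat)):Int) := by push_cast; ring
        rw [hcc]
      rw [e1, List.foldl_append, e2, List.foldl_append,
        foldl_fixed _ _ _ hfix1, List.foldl_cons, List.foldl_nil, hone]
      have hcast : (s:Int)+(m:Int)+1 = (((s+m:Nat)):Int)+1 := by push_cast; ring
      rw [hcast]
      have hrec := ih (k - m) (by omega) (s + m) t (by omega)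
      rw [htok]
      simp only [chainOk]
      rw [← hmdef, ← htdef]
      rw [List.drop_drop]
      try rw [Nat.add_comm m s]
      have hbt : (t != b) = true := bne_iff_ne.2 htb
      rw [hbt, Bool.true_and]
      exact hrec

lemma chain_empty (r : List Char) : chainOk [] (tokenizeB r).1 = noAdj (tokenizeB r).1 := by
  by_cases hm : matchLen r = 0
  · rw [tokenize_none hm]; rfl
  · rw [tokenize_pos hm]
    simp only
    have hne : (r.take (matchLen r) != ([] : List Char)) = true := by
      have h1 : 1 ≤ matchLen r := Nat.one_le_iff_ne_zero.2 hm
      have h2 := matchLen_le r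
      have h3 : (r.take (matchLen r)).length = matchLen r := by
        rw [List.length_take]
        omega
      rw [bne_iff_ne]
      intro hcon
      rw [hcon] at h3
      simp at h3
      omega
    rw [chainOk, hne, Bool.true_and, chainOk_noAdj]

lemma perWord (word : String) :
    ((((PySem.List.pyRange 1 ((word.toList.length:Int)+1) 1).foldl (stepA word.toList) (0, [])).1
        = (word.toList.length:Int))
      ↔ ((tokenizeB word.toList).2 = [] ∧ noAdj (tokenizeB word.toList).1 = true)) := by
  have h := loopA word.toList word.toList.length 0 [] (by omega)
  simp only [Nat.cast_zero, List.drop_zero, zero_add] at h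
  rw [h, chain_empty]

-- ===== VERDICT (by name: the statement is the Claim_ definition above) =====
theorem solution_spec : Claim_equal_solution := by
  unfold Claim_equal_solution Spec_solution
  intro babbling _
  unfold solution solution_alt
  congr 1
  funext answer word
  exact if_congr (perWord word) rfl rfl
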